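-- pv_equiv track=rewrite | github.com/ovehagstrom/stenove | Lab1 Kurs 2/tramdata.py | build_tram_lines
-- ===== SOURCE A (Python) =====
-- def build_tram_lines(lines):
--     tram_lines, current_line, stops = {}, None, []
--
--     for line in lines.splitlines():
--         line = line.strip()
--         if line.endswith(":"):
--             if current_line:
--                 tram_lines[current_line] = stops
--             current_line = line[:-1].strip()
--             stops = []
--         elif line:
--             stopname = " ".join(line.split()[:-1])
--             stops.append(stopname)
--
--     if current_line:
--         tram_lines[current_line] = stops
--
--     return tram_lines
-- ===== SOURCE B (Python) =====
-- def build_tram_lines(lines):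
--     # Recursive divide-and-conquer: strip all lines, drop orphan lines before the
--     # first header, then recursively peel one whole section at a time by scanning
--     # ahead for the next header and slicing.
--     ls = [l.strip() for l in lines.splitlines()]
--     while ls and not ls[0].endswith(":"):
--         ls.pop(0)
--     return dict(_sections(ls))
--
-- def _sections(ls):
--     if not ls:
--         return []
--     k = next((j for j in range(1, len(ls)) if ls[j].endswith(":")), len(ls))
--     name = ls[0][:-1].strip()
--     sec = [(name, [" ".join(l.split()[:-1]) for l in ls[1:k] if l])] if name else []
--     return sec + _sections(ls[k:])
-- ===== Notes on version B (the rewrite author's own statement) =====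
-- stated objective: alternative
-- what changed: Replaces A's single forward pass with a mutable state machine (current header, stops buffer flushed into the dict) by a recursive divide-and-conquer: strip everything up front, drop orphan lines, then recursively peel one whole section at a time by scanning ahead for the next header and slicing, finishing with dict() over the section pairs.
import Mathlib
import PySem

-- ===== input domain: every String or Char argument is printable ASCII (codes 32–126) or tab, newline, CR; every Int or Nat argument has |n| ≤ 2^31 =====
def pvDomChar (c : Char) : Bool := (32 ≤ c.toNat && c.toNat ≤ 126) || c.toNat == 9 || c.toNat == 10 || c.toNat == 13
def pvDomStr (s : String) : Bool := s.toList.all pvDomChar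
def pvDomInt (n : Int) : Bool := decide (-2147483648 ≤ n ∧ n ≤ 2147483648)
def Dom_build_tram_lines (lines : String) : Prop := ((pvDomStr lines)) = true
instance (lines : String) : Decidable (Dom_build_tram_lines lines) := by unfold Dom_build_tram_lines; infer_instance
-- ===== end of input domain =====

-- B replaces A's one-pass mutable state machine by a recursive section-peeling decomposition; return values proved equal.

-- shared sub-expression of both Pythons: " ".join(l.split()[:-1])
def pvStopName (l : String) : String :=
  PySem.Str.join " " (PySem.List.slice (PySem.Str.split₀ l) none (some (-1)))

-- ===== PORT A =====
-- A's loop body: state = (tram_lines, current_line, stops)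
def pvStepA (st : PySem.Dict String (List String) × Option String × List String)
    (raw : String) : PySem.Dict String (List String) × Option String × List String :=
  let line := PySem.Str.strip raw
  if PySem.Str.endswith line ":" then
    let tl := match st.2.1 with
      | some c => if c ≠ "" then st.1.insert c st.2.2 else st.1
      | none => st.1
    (tl, some (PySem.Str.strip (PySem.Str.slice line none (some (-1)))), [])
  else if line ≠ "" then
    (st.1, st.2.1, st.2.2 ++ [pvStopName line])
  else st

-- A's trailing flush of the open section
def pvFinishA (st : PySem.Dict String (List String) × Option String × List String) :
    List (String × List String) :=
  (match st.2.1 with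
    | some c => if c ≠ "" then st.1.insert c st.2.2 else st.1
    | none => st.1).items

def build_tram_lines (lines : String) : List (String × List String) :=
  pvFinishA ((PySem.Str.splitlines lines).foldl pvStepA (PySem.Dict.empty, none, []))

-- ===== PORT B =====
-- B's `while ls and not ls[0].endswith(":"): ls.pop(0)` (drop orphan lines)
def pvDropOrphans : List String → List String
  | [] => []
  | l :: ls => if PySem.Str.endswith l ":" then l :: ls else pvDropOrphans ls

-- B's `next((j for j in range(1, len(ls)) if ls[j].endswith(":")), len(ls))`,
-- as the generator's scan over ls[1:]; the returned k equals pvScan ls[1:] + 1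
def pvScan : List String → Nat
  | [] => 0
  | l :: ls => if PySem.Str.endswith l ":" then 0 else pvScan ls + 1

-- B's recursive _sections, with fuel = list length making the structural recursion
-- explicit (each call peels ls[k:] with k ≥ 1, so fuel never runs out);
-- ls[1:k] = rest.take (k-1) and ls[k:] = rest.drop (k-1) are exact since 1 ≤ k ≤ len ls
def pvSectionsF : Nat → List String → List (String × List String)
  | 0, _ => []
  | _, [] => []
  | fuel+1, l :: rest =>
    (if PySem.Str.strip (PySem.Str.slice l none (some (-1))) ≠ "" then
        [(PySem.Str.strip (PySem.Str.slice l none (some (-1))),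
          ((rest.take (pvScan rest)).filter (fun x => x ≠ "")).map pvStopName)]
      else []) ++ pvSectionsF fuel (rest.drop (pvScan rest))

def pvSections (ls : List String) : List (String × List String) :=
  pvSectionsF ls.length ls

def build_tram_lines_alt (lines : String) : List (String × List String) :=
  ((pvSections (pvDropOrphans ((PySem.Str.splitlines lines).map PySem.Str.strip))).foldl
      (fun d p => d.insert p.1 p.2) PySem.Dict.empty).items

-- ===== PRECONDITION & SPEC =====
def Spec_build_tram_lines (lines : String) (out : List (String × List String)) : Prop := out = build_tram_lines_alt lines
instance (lines : String) (out : List (String × List String)) : Decidable (Spec_build_tram_lines lines out) := by unfold Spec_build_tram_lines; infer_instance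

-- ===== CLAIM (what is proved, stated in full; the proofs are below) =====
def Claim_equal_build_tram_lines : Prop := ∀ (lines : String), Dom_build_tram_lines lines → Spec_build_tram_lines lines (build_tram_lines lines)

-- ===== LEMMAS AND PROOFS =====

-- proof-side intermediate: a left-to-right sectioning fold producing
-- (header name, nonempty body lines) pairs, empty names kept
def pvStepB (secs : List (String × List String)) (raw : String) : List (String × List String) :=
  let line := PySem.Str.strip raw
  if PySem.Str.endswith line ":" then
    secs ++ [(PySem.Str.strip (PySem.Str.slice line none (some (-1))), [])]
  else if line ≠ "" then
    match secs.getLast? with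
    | some last => secs.dropLast ++ [(last.1, last.2 ++ [line])]
    | none => secs
  else secs

def pvIns (d : PySem.Dict String (List String)) (sec : String × List String) :
    PySem.Dict String (List String) :=
  if sec.1 ≠ "" then d.insert sec.1 (sec.2.map pvStopName) else d

-- invariant relating A's running state to the section list
def pvRel (st : PySem.Dict String (List String) × Option String × List String)
    (secs : List (String × List String)) : Prop :=
  st.1 = secs.dropLast.foldl pvIns PySem.Dict.empty ∧
  (match secs.getLast? with
   | none => st.2.1 = none
   | some (n, body) => st.2.1 = some n ∧ (n ≠ "" → st.2.2 = body.map pvStopName))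

theorem pvRel_step (st : PySem.Dict String (List String) × Option String × List String)
    (secs : List (String × List String)) (raw : String) (h : pvRel st secs) :
    pvRel (pvStepA st raw) (pvStepB secs raw) := by
  obtain ⟨st1, cur, stops⟩ := st
  by_cases hdr : PySem.Chars.endswith (PySem.Chars.strip raw.toList) [':'] = true
  all_goals by_cases hne : PySem.Str.strip raw = ""
  all_goals rcases secs.eq_nil_or_concat with rfl | ⟨cs, ⟨n, body⟩, hsec⟩
  all_goals try subst hsec
  all_goals try simp only [List.concat_eq_append] at h ⊢
  all_goals simp only [pvRel, List.getLast?_nil, List.getLast?_concat, List.dropLast_nil,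
    List.dropLast_concat, List.foldl_nil] at h
  all_goals obtain ⟨h1, hc⟩ := h
  all_goals try obtain ⟨hc, h3⟩ := hc
  all_goals try subst hc
  -- a stripped line cannot both be empty and end with ':'
  all_goals try (exfalso
                 have h0 : PySem.Chars.strip raw.toList = [] := by
                   rw [← PySem.Str.toList_strip, hne]; rfl
                 rw [h0] at hdr; exact absurd hdr (by decide))
  all_goals simp only [pvStepA, pvStepB, hne]
  -- header over empty section list
  · simp [pvRel, hdr, h1]
  -- header closing the previous section
  · by_cases hn : n = ""
    · subst hn
      simp [pvRel, hdr, h1, List.foldl_append, pvIns]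
    · simp [pvRel, hdr, hn, h1, h3 hn, List.foldl_append, pvIns]
  -- blank line
  · have hdr0 : PySem.Chars.endswith ([] : List Char) [':'] = false := by decide
    simp [pvRel, hdr0, h1]
  · have hdr0 : PySem.Chars.endswith ([] : List Char) [':'] = false := by decide
    simp [pvRel, hdr0, h1]
    exact h3
  -- stop line, no section yet
  · simp [pvRel, hdr, hne, h1]
  -- stop line appended to the open section
  · simp only [List.getLast?_concat]
    simp [pvRel, hdr, hne, h1]
    intro hn
    simp [h3 hn]

theorem pvRel_fold (ls : List String)
    (st : PySem.Dict String (List String) × Option String × List String)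
    (secs : List (String × List String)) (h : pvRel st secs) :
    pvRel (ls.foldl pvStepA st) (ls.foldl pvStepB secs) := by
  induction ls generalizing st secs with
  | nil => exact h
  | cons l ls ih =>
    simp only [List.foldl_cons]
    exact ih _ _ (pvRel_step _ _ _ h)

theorem pvRel_finish (st : PySem.Dict String (List String) × Option String × List String)
    (secs : List (String × List String)) (h : pvRel st secs) :
    pvFinishA st = (secs.foldl pvIns PySem.Dict.empty).items := by
  obtain ⟨st1, cur, stops⟩ := st
  rcases secs.eq_nil_or_concat with rfl | ⟨cs, ⟨n, body⟩, hsec⟩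
  all_goals try subst hsec
  all_goals try simp only [List.concat_eq_append] at h ⊢
  all_goals simp only [pvRel, List.getLast?_nil, List.getLast?_concat, List.dropLast_nil,
    List.dropLast_concat, List.foldl_nil] at h
  · obtain ⟨h1, h2⟩ := h
    subst h2; subst h1
    simp [pvFinishA]
  · obtain ⟨h1, h2, h3⟩ := h
    subst h2; subst h1
    by_cases hn : n = ""
    · subst hn
      simp [pvFinishA, List.foldl_append, pvIns]
    · simp [pvFinishA, hn, h3 hn, List.foldl_append, pvIns]

-- the non-header predicate of the scan
def pvNotHdr (l : String) : Bool := !PySem.Str.endswith l ":"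

-- scan = takeWhile/dropWhile split
theorem pvScan_take (ls : List String) :
    ls.take (pvScan ls) = ls.takeWhile pvNotHdr ∧ ls.drop (pvScan ls) = ls.dropWhile pvNotHdr := by
  induction ls with
  | nil => simp [pvScan]
  | cons l ls ih =>
    by_cases h : PySem.Str.endswith l ":"
    · simp only [pvScan, h, if_true, List.take_zero, List.drop_zero,
        List.takeWhile_cons, List.dropWhile_cons, pvNotHdr, Bool.not_eq_eq_eq_not]
      simp [h]
    · simp only [pvScan, h, if_false, List.take_succ_cons, List.drop_succ_cons,
        List.takeWhile_cons, List.dropWhile_cons, pvNotHdr]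
      simp [h, ih.1, ih.2, pvNotHdr]

-- recursive characterisation of the sectioning fold (empty names kept)
def pvSecsR : List String → List (String × List String)
  | [] => []
  | l :: rest =>
    if PySem.Str.endswith l ":" then
      (PySem.Str.strip (PySem.Str.slice l none (some (-1))),
        (rest.takeWhile pvNotHdr).filter (fun x => x ≠ "")) ::
        pvSecsR (rest.dropWhile pvNotHdr)
    else pvSecsR rest
  termination_by ls => ls.length
  decreasing_by
    · simp only [List.length_cons]
      exact Nat.lt_succ_of_le (List.dropWhile_sublist _).length_le
    · simp

-- named-section pair → dict-entry pair
def pvF (p : String × List String) : Option (String × List String) :=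
  if p.1 ≠ "" then some (p.1, p.2.map pvStopName) else none

-- head of a dropWhile satisfies the negated predicate
theorem pvHead_dropWhile (p : String → Bool) (ls : List String) (x : String)
    (h : x ∈ (ls.dropWhile p).head?) : p x = false := by
  match hdw : ls.dropWhile p with
  | [] => simp [hdw] at h
  | y :: ys =>
    rw [hdw] at h
    simp only [List.head?_cons, Option.mem_def, Option.some.injEq] at h
    subst h
    have := List.head_dropWhile_not p (l := ls) (by simp [hdw])
    simpa [hdw] using this

-- pvSectionsF on a header-headed list = named, mapped pvSecsR sections
theorem pvSections_eq_aux (fuel : Nat) : ∀ ls : List String, ls.length ≤ fuel →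
    (∀ h ∈ ls.head?, PySem.Str.endswith h ":" = true) →
    pvSectionsF fuel ls = (pvSecsR ls).filterMap pvF := by
  induction fuel with
  | zero =>
    intro ls hlen _
    rw [Nat.le_zero, List.length_eq_zero_iff] at hlen
    subst hlen
    simp [pvSectionsF, pvSecsR]
  | succ n ih =>
    intro ls hlen hhd
    match ls with
    | [] => simp [pvSectionsF, pvSecsR]
    | l :: rest =>
      have hdr : PySem.Str.endswith l ":" = true := hhd l (by simp)
      rw [pvSectionsF, pvSecsR]
      simp only [hdr, if_true]
      rw [(pvScan_take rest).1, (pvScan_take rest).2]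
      rw [ih (rest.dropWhile pvNotHdr)
          (le_trans (List.dropWhile_sublist _).length_le (by simpa using hlen))
          (by
            intro h hh
            have := pvHead_dropWhile pvNotHdr rest h hh
            simpa [pvNotHdr] using this)]
      by_cases hn : PySem.Str.strip (PySem.Str.slice l none (some (-1))) = ""
      · simp [pvF, hn]
      · simp [pvF, hn]

theorem pvSections_dropOrphans (ls : List String) :
    pvSections (pvDropOrphans ls) = (pvSecsR ls).filterMap pvF := by
  induction ls with
  | nil => simp [pvDropOrphans, pvSections, pvSectionsF, pvSecsR]
  | cons l rest ih =>
    by_cases h : PySem.Str.endswith l ":"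
    · rw [pvDropOrphans]
      simp only [h, if_true]
      exact pvSections_eq_aux (l :: rest).length _ le_rfl (by simpa using h)
    · have h' : PySem.Chars.endswith l.toList [':'] = false := by
        rw [← Bool.not_eq_true]; simpa [PySem.Str.endswith] using h
      rw [pvDropOrphans, pvSecsR]
      simp [h', ih]

-- folding pvIns over raw sections = folding plain insert over the filterMapped pairs
theorem pvFold_pvIns (ss : List (String × List String)) (d : PySem.Dict String (List String)) :
    ss.foldl pvIns d =
      (ss.filterMap pvF).foldl (fun d p => d.insert p.1 p.2) d := by
  induction ss generalizing d with
  | nil => simp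
  | cons s ss ih =>
    obtain ⟨n, b⟩ := s
    by_cases hn : n = ""
    · simp [pvF, pvIns, hn, ih]
    · simp [pvF, pvIns, hn, ih]

-- the sectioning fold computes pvSecsR of the stripped lines
theorem pvStepB_fold_open (rs : List String) : ∀ (cs : List (String × List String)) (n : String) (b : List String),
    rs.foldl pvStepB (cs ++ [(n, b)]) =
      cs ++ [(n, b ++ ((rs.map PySem.Str.strip).takeWhile pvNotHdr).filter (fun x => x ≠ ""))]
        ++ pvSecsR ((rs.map PySem.Str.strip).dropWhile pvNotHdr) := by
  induction rs with
  | nil => intro cs n b; simp [pvSecsR]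
  | cons r rs ih =>
    intro cs n b
    simp only [List.foldl_cons, List.map_cons]
    by_cases hdr : PySem.Chars.endswith (PySem.Chars.strip r.toList) [':'] = true
    · have hstep : pvStepB (cs ++ [(n, b)]) r =
          (cs ++ [(n, b)]) ++ [(PySem.Str.strip (PySem.Str.slice (PySem.Str.strip r) none (some (-1))), [])] := by
        simp [pvStepB, hdr]
      rw [hstep, ih, List.takeWhile_cons, List.dropWhile_cons]
      simp [pvSecsR, pvNotHdr, hdr]
    · by_cases hne : PySem.Str.strip r = ""
      · have h0 : PySem.Chars.strip r.toList = [] := by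
          rw [← PySem.Str.toList_strip, hne]; rfl
        have hdr0 : PySem.Chars.endswith ([] : List Char) [':'] = false := by decide
        have hstep : pvStepB (cs ++ [(n, b)]) r = cs ++ [(n, b)] := by
          simp [pvStepB, h0, hdr0, hne]
        rw [hstep, ih, List.takeWhile_cons, List.dropWhile_cons]
        simp [pvNotHdr, h0, hdr0, hne, List.filter_cons]
      · have hstep : pvStepB (cs ++ [(n, b)]) r = cs ++ [(n, b ++ [PySem.Str.strip r])] := by
          simp [pvStepB, hdr, hne]
        rw [hstep, ih, List.takeWhile_cons, List.dropWhile_cons]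
        simp [pvNotHdr, hdr, hne, List.filter_cons]

theorem pvStepB_fold (rs : List String) :
    rs.foldl pvStepB [] = pvSecsR (rs.map PySem.Str.strip) := by
  induction rs with
  | nil => simp [pvSecsR]
  | cons r rs ih =>
    simp only [List.foldl_cons, List.map_cons]
    by_cases hdr : PySem.Chars.endswith (PySem.Chars.strip r.toList) [':'] = true
    · have hstep : pvStepB [] r =
          [] ++ [(PySem.Str.strip (PySem.Str.slice (PySem.Str.strip r) none (some (-1))), [])] := by
        simp [pvStepB, hdr]
      rw [hstep, pvStepB_fold_open rs [] _ []]
      simp [pvSecsR, hdr]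
    · by_cases hne : PySem.Str.strip r = ""
      · have h0 : PySem.Chars.strip r.toList = [] := by
          rw [← PySem.Str.toList_strip, hne]; rfl
        have hdr0 : PySem.Chars.endswith ([] : List Char) [':'] = false := by decide
        have hstep : pvStepB [] r = [] := by simp [pvStepB, h0, hdr0, hne]
        rw [hstep, ih]
        simp [pvSecsR, h0, hdr0]
      · have hstep : pvStepB [] r = [] := by simp [pvStepB, hdr, hne]
        rw [hstep, ih]
        simp [pvSecsR, hdr]

-- ===== VERDICT (by name: the statement is the Claim_ definition above) =====
theorem build_tram_lines_spec : Claim_equal_build_tram_lines := by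
  intro lines _
  show build_tram_lines lines = build_tram_lines_alt lines
  unfold build_tram_lines build_tram_lines_alt
  rw [pvRel_finish _ ((PySem.Str.splitlines lines).foldl pvStepB [])
      (pvRel_fold _ (PySem.Dict.empty, none, []) [] ⟨rfl, rfl⟩)]
  rw [pvStepB_fold, pvFold_pvIns, ← pvSections_dropOrphans]
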